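-- pv_equiv track=rewrite | github.com/phil-silveira/data-communication-exercices | linear-coding-methods.py | decode2B1Q
-- ===== SOURCE A (Python) =====
-- def bin2str(bitStream):
--     message = ''
--     for b in range(0, len(bitStream) -1, 8):
--         message += chr(int(''.join(map(str, bitStream[b:b+8])), 2))
--     return message
--
-- def decode2B1Q(encodedBitStream, HIGH1=1, HIGH2=2, LOW1=-1, LOW2=-2):
--     bitStream = []
--     for x in encodedBitStream:
--         if   x == HIGH2:
--             bitStream.extend(['1','0'])
--         elif x == HIGH1:
--             bitStream.extend(['1','1'])
--         elif x == LOW1: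
--             bitStream.extend(['0','1'])
--         elif x == LOW2:
--             bitStream.extend(['0','0'])
--
--     message = bin2str(bitStream)
--     return message
-- ===== SOURCE B (Python) =====
-- def decode2B1Q(encodedBitStream, HIGH1=1, HIGH2=2, LOW1=-1, LOW2=-2):
--     out = []
--     acc = 0
--     cnt = 0
--     for x in encodedBitStream:
--         if x == HIGH2:
--             v = 2
--         elif x == HIGH1:
--             v = 3
--         elif x == LOW1:
--             v = 1
--         elif x == LOW2:
--             v = 0
--         else:
--             continue
--         acc = acc * 4 + v
--         cnt += 1
--         if cnt == 4:
--             out.append(chr(acc))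
--             acc = 0
--             cnt = 0
--     if cnt:
--         out.append(chr(acc))
--     return ''.join(out)
-- ===== Notes on version B (the rewrite author's own statement) =====
-- stated objective: alternative
-- what changed: Instead of building an intermediate list of bit-character strings and re-parsing 8-character binary strings with int(s,2) per byte, B maps each symbol to a 2-bit integer and accumulates character codes arithmetically (acc = acc*4 + v) in one pass, emitting chr(acc) per group of four symbols and once for a trailing partial group.
import Mathlib
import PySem

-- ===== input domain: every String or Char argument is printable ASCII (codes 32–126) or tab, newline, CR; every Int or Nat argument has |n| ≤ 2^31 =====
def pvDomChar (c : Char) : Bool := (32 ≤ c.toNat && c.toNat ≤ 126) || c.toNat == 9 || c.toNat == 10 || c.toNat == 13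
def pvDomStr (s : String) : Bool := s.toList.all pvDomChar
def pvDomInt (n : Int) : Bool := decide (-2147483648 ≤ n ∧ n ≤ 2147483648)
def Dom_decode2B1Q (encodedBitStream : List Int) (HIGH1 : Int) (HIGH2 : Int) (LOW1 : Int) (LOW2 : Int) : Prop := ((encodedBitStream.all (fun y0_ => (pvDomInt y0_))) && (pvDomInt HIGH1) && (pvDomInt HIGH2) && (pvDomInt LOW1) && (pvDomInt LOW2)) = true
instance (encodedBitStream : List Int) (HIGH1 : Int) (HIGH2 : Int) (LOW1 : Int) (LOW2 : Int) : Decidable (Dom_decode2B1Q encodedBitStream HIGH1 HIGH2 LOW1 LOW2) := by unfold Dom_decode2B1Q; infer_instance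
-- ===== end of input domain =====

-- B replaces A's bit-string building + int(s,2) per byte with one arithmetic pass
-- (acc = acc*4 + value per symbol, chr per group of four); same cost, different decomposition.

-- ===== PORT A =====
-- Python strings of '0'/'1' characters are represented as List Char, so ''.join(map(str, …))
-- is the identity on the character list; int(s, 2) is PySem.Int.ofCharsBase? (the .getD 0 arm is
-- unreachable: every slice taken is a nonempty string of binary digits, on which int(s,2) returns).
def pvBin2str (bitStream : List Char) : String :=
  String.mk <|
    (PySem.List.pyRange 0 ((bitStream.length : Int) - 1) 8).foldl
      (fun message b =>
        message ++ [Char.ofNat ((PySem.Int.ofCharsBase?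
          (PySem.List.slice bitStream (some b) (some (b + 8))) 2).getD 0).toNat])
      []

def decode2B1Q (encodedBitStream : List Int) (HIGH1 : Int) (HIGH2 : Int) (LOW1 : Int) (LOW2 : Int) : String :=
  pvBin2str <|
    encodedBitStream.foldl
      (fun bitStream x =>
        if x = HIGH2 then bitStream ++ ['1', '0']
        else if x = HIGH1 then bitStream ++ ['1', '1']
        else if x = LOW1 then bitStream ++ ['0', '1']
        else if x = LOW2 then bitStream ++ ['0', '0']
        else bitStream)
      []

-- ===== PORT B =====
-- state (out, acc, cnt): out = emitted characters, acc = code of the current partial group,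
-- cnt = number of symbols in the current partial group (Source B's ''.join(out) is String.mk).
def decode2B1Q_alt (encodedBitStream : List Int) (HIGH1 : Int) (HIGH2 : Int) (LOW1 : Int) (LOW2 : Int) : String :=
  let st := encodedBitStream.foldl
    (fun (s : List Char × Nat × Nat) x =>
      match (if x = HIGH2 then some 2
             else if x = HIGH1 then some 3
             else if x = LOW1 then some 1
             else if x = LOW2 then some 0
             else none : Option Nat) with
      | some v =>
        let acc := s.2.1 * 4 + v
        if s.2.2 + 1 = 4 then (s.1 ++ [Char.ofNat acc], 0, 0)
        else (s.1, acc, s.2.2 + 1)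
      | none => s)
    ([], 0, 0)
  String.mk (if st.2.2 = 0 then st.1 else st.1 ++ [Char.ofNat st.2.1])

-- ===== PRECONDITION & SPEC =====
def Spec_decode2B1Q (encodedBitStream : List Int) (HIGH1 : Int) (HIGH2 : Int) (LOW1 : Int) (LOW2 : Int) (out : String) : Prop := out = decode2B1Q_alt encodedBitStream HIGH1 HIGH2 LOW1 LOW2
instance (encodedBitStream : List Int) (HIGH1 : Int) (HIGH2 : Int) (LOW1 : Int) (LOW2 : Int) (out : String) : Decidable (Spec_decode2B1Q encodedBitStream HIGH1 HIGH2 LOW1 LOW2 out) := by unfold Spec_decode2B1Q; infer_instance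

-- ===== CLAIM (what is proved, stated in full; the proofs are below) =====
def Claim_equal_decode2B1Q : Prop := ∀ (encodedBitStream : List Int) (HIGH1 : Int) (HIGH2 : Int) (LOW1 : Int) (LOW2 : Int), Dom_decode2B1Q encodedBitStream HIGH1 HIGH2 LOW1 LOW2 → Spec_decode2B1Q encodedBitStream HIGH1 HIGH2 LOW1 LOW2 (decode2B1Q encodedBitStream HIGH1 HIGH2 LOW1 LOW2)

-- ===== LEMMAS AND PROOFS =====

-- the common abstraction: the decoded symbol values (HIGH2↦2, HIGH1↦3, LOW1↦1, LOW2↦0)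
def pvSym (H1 H2 L1 L2 x : Int) : Option (Fin 4) :=
  if x = H2 then some 2 else if x = H1 then some 3
  else if x = L1 then some 1 else if x = L2 then some 0 else none

def pvSymN (H1 H2 L1 L2 x : Int) : Option Nat :=
  if x = H2 then some 2 else if x = H1 then some 3
  else if x = L1 then some 1 else if x = L2 then some 0 else none

def pvBits2 (v : Fin 4) : List Char :=
  match v with
  | 0 => ['0', '0'] | 1 => ['0', '1'] | 2 => ['1', '0'] | 3 => ['1', '1']

def pvByte (cs : List Char) : Char :=
  Char.ofNat ((PySem.Int.ofCharsBase? cs 2).getD 0).toNat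

-- reference result: one character per group of four symbol values, plus a trailing partial group
def pvChunk4 : List (Fin 4) → List Char
  | [] => []
  | a :: b :: c :: d :: rest =>
      Char.ofNat (((a.val * 4 + b.val) * 4 + c.val) * 4 + d.val) :: pvChunk4 rest
  | [a] => [Char.ofNat a.val]
  | [a, b] => [Char.ofNat (a.val * 4 + b.val)]
  | [a, b, c] => [Char.ofNat ((a.val * 4 + b.val) * 4 + c.val)]

-- B's step on a decoded value
def pvStepB (s : List Char × Nat × Nat) (v : Nat) : List Char × Nat × Nat :=
  let acc := s.2.1 * 4 + v
  if s.2.2 + 1 = 4 then (s.1 ++ [Char.ofNat acc], 0, 0) else (s.1, acc, s.2.2 + 1)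

lemma pv_length_bits2 (v : Fin 4) : (pvBits2 v).length = 2 := by
  fin_cases v <;> rfl

lemma pv_byte1 : ∀ a : Fin 4, pvByte ((pvBits2 a).take 8) = Char.ofNat a.val := by decide

lemma pv_byte2 : ∀ a b : Fin 4,
    pvByte ((pvBits2 a ++ pvBits2 b).take 8) = Char.ofNat (a.val * 4 + b.val) := by decide

lemma pv_byte3 : ∀ a b c : Fin 4,
    pvByte ((pvBits2 a ++ (pvBits2 b ++ pvBits2 c)).take 8)
      = Char.ofNat ((a.val * 4 + b.val) * 4 + c.val) := by decide

lemma pv_byte4 : ∀ a b c d : Fin 4,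
    pvByte (pvBits2 a ++ (pvBits2 b ++ (pvBits2 c ++ pvBits2 d)))
      = Char.ofNat (((a.val * 4 + b.val) * 4 + c.val) * 4 + d.val) := by decide

-- A's symbol loop builds exactly the flattened bit pairs of the decoded values
lemma pv_la1 (H1 H2 L1 L2 : Int) (l : List Int) (acc : List Char) :
    l.foldl
      (fun bitStream x =>
        if x = H2 then bitStream ++ ['1', '0']
        else if x = H1 then bitStream ++ ['1', '1']
        else if x = L1 then bitStream ++ ['0', '1']
        else if x = L2 then bitStream ++ ['0', '0']
        else bitStream)
      acc
    = acc ++ (l.filterMap (pvSym H1 H2 L1 L2)).flatMap pvBits2 := by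
  induction l generalizing acc with
  | nil => simp
  | cons x t ih =>
    simp only [List.foldl_cons, List.filterMap_cons, pvSym]
    split_ifs <;> simp [ih, pvBits2, pvSym]

lemma pv_length_flat (vals : List (Fin 4)) : (vals.flatMap pvBits2).length = 2 * vals.length := by
  induction vals with
  | nil => simp
  | cons a t ih => simp [ih, pv_length_bits2]; omega

-- the byte loop over the flattened bits computes pvChunk4
lemma pv_la2 : ∀ (n : Nat) (vals : List (Fin 4)) (acc : List Char),
    n = (2 * vals.length + 6) / 8 →
    (List.range n).foldl
      (fun m k => m ++ [pvByte (((vals.flatMap pvBits2).drop (8 * k)).take 8)]) acc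
    = acc ++ pvChunk4 vals := by
  intro n
  induction n with
  | zero =>
    intro vals acc h
    have : vals.length = 0 := by omega
    rw [List.length_eq_zero_iff] at this
    subst this
    simp [pvChunk4]
  | succ n ih =>
    intro vals acc h
    rcases vals with _ | ⟨a, _ | ⟨b, _ | ⟨c, _ | ⟨d, rest⟩⟩⟩⟩
    · simp only [List.length_nil] at h; omega
    · have hn : n = 0 := by simp only [List.length_cons, List.length_nil] at h; omega
      subst hn
      simp [pvChunk4, pv_byte1 a, List.range_succ]
    · have hn : n = 0 := by simp only [List.length_cons, List.length_nil] at h; omega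
      subst hn
      simp [pvChunk4, pv_byte2 a b, List.range_succ]
    · have hn : n = 0 := by simp only [List.length_cons, List.length_nil] at h; omega
      subst hn
      simp [pvChunk4, pv_byte3 a b c, List.range_succ]
    · have hkey : (a :: b :: c :: d :: rest).flatMap pvBits2
          = (pvBits2 a ++ pvBits2 b ++ pvBits2 c ++ pvBits2 d) ++ rest.flatMap pvBits2 := by
        simp [List.append_assoc]
      have hplen : (pvBits2 a ++ pvBits2 b ++ pvBits2 c ++ pvBits2 d).length = 8 := by
        simp [pv_length_bits2]
      rw [List.range_succ_eq_map, List.foldl_cons, List.foldl_map]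
      have h0 : (((a :: b :: c :: d :: rest).flatMap pvBits2).drop (8 * 0)).take 8
          = pvBits2 a ++ pvBits2 b ++ pvBits2 c ++ pvBits2 d := by
        rw [hkey, Nat.mul_zero, List.drop_zero, List.take_left' hplen]
      have hb : ∀ k : Nat,
          (((a :: b :: c :: d :: rest).flatMap pvBits2).drop (8 * Nat.succ k)).take 8
            = ((rest.flatMap pvBits2).drop (8 * k)).take 8 := by
        intro k
        rw [hkey]
        have h8 : 8 * Nat.succ k = (pvBits2 a ++ pvBits2 b ++ pvBits2 c ++ pvBits2 d).length + 8 * k := by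
          rw [hplen]; omega
        rw [h8, ← List.drop_drop, List.drop_left]
      simp only [hb, h0]
      rw [ih rest _ (by simp only [List.length_cons] at h ⊢; omega)]
      have hby : pvByte (pvBits2 a ++ pvBits2 b ++ pvBits2 c ++ pvBits2 d)
          = Char.ofNat (((a.val * 4 + b.val) * 4 + c.val) * 4 + d.val) := by
        rw [List.append_assoc, List.append_assoc]
        exact pv_byte4 a b c d
      rw [hby]
      simp [pvChunk4]

-- bridge: A's pvBin2str on the flattened bits is exactly pvChunk4
lemma pv_laTop (vals : List (Fin 4)) :
    pvBin2str (vals.flatMap pvBits2) = String.mk (pvChunk4 vals) := by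
  unfold pvBin2str
  rw [PySem.List.pyRange_of_pos _ _ (by norm_num : (0:Int) < 8)]
  have hlen := pv_length_flat vals
  have hN : (if (0:Int) < ((vals.flatMap pvBits2).length : Int) - 1
        then ((((vals.flatMap pvBits2).length : Int) - 1 - 0 + 8 - 1) / 8).toNat else 0)
      = (2 * vals.length + 6) / 8 := by
    rw [hlen]; split_ifs with hpos <;> omega
  rw [hN, List.foldl_map]
  have hstep : ∀ (m : List Char) (k : Nat),
      m ++ [Char.ofNat ((PySem.Int.ofCharsBase?
          (PySem.List.slice (vals.flatMap pvBits2)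
            (some (0 + 8 * (k : Int))) (some (0 + 8 * (k : Int) + 8))) 2).getD 0).toNat]
      = m ++ [pvByte (((vals.flatMap pvBits2).drop (8 * k)).take 8)] := by
    intro m k
    have h1 : (0 + 8 * (k : Int)) = ((8 * k : Nat) : Int) := by push_cast; ring
    have h2 : (0 + 8 * (k : Int) + 8) = ((8 * k + 8 : Nat) : Int) := by push_cast; ring
    rw [h2, h1, PySem.List.slice_natCast]
    have h3 : 8 * k + 8 - 8 * k = 8 := by omega
    rw [h3]
    rfl
  simp only [hstep]
  rw [pv_la2 _ vals [] rfl]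
  rfl

-- filterMap through Nat values is the Fin-valued one mapped through .val
lemma pv_symN_eq (H1 H2 L1 L2 x : Int) :
    pvSymN H1 H2 L1 L2 x = (pvSym H1 H2 L1 L2 x).map Fin.val := by
  unfold pvSym pvSymN
  split_ifs <;> rfl

lemma pv_valsN (H1 H2 L1 L2 : Int) (l : List Int) :
    l.filterMap (pvSymN H1 H2 L1 L2) = (l.filterMap (pvSym H1 H2 L1 L2)).map Fin.val := by
  have hf : pvSymN H1 H2 L1 L2 = fun x => (pvSym H1 H2 L1 L2 x).map Fin.val :=
    funext (pv_symN_eq H1 H2 L1 L2)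
  rw [hf, ← List.map_filterMap]

-- B's fold over the decoded values, finalized, computes pvChunk4
lemma pv_lb2 : ∀ (vals : List (Fin 4)) (out : List Char),
    (let st := vals.foldl (fun s a => pvStepB s a.val) (out, 0, 0)
     if st.2.2 = 0 then st.1 else st.1 ++ [Char.ofNat st.2.1])
    = out ++ pvChunk4 vals := by
  intro vals
  induction vals using pvChunk4.induct with
  | case1 => intro out; simp [pvChunk4]
  | case2 a b c d rest ih =>
    intro out
    show (let st := (a :: b :: c :: d :: rest).foldl (fun s a => pvStepB s a.val) (out, 0, 0)
          if st.2.2 = 0 then st.1 else st.1 ++ [Char.ofNat st.2.1])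
        = out ++ pvChunk4 (a :: b :: c :: d :: rest)
    have hfold : (a :: b :: c :: d :: rest).foldl (fun s a => pvStepB s a.val) (out, 0, 0)
        = rest.foldl (fun s a => pvStepB s a.val)
            (out ++ [Char.ofNat (((a.val * 4 + b.val) * 4 + c.val) * 4 + d.val)], 0, 0) := by
      simp only [List.foldl_cons, pvStepB]
      norm_num
    rw [hfold]
    rw [ih (out ++ [Char.ofNat (((a.val * 4 + b.val) * 4 + c.val) * 4 + d.val)])]
    simp [pvChunk4]
  | case3 a => intro out; simp [pvStepB, pvChunk4]
  | case4 a b => intro out; simp [pvStepB, pvChunk4]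
  | case5 a b c => intro out; simp [pvStepB, pvChunk4]

-- B's port equals pvChunk4 of the decoded values
lemma pv_lbTop (l : List Int) (H1 H2 L1 L2 : Int) :
    decode2B1Q_alt l H1 H2 L1 L2 = String.mk (pvChunk4 (l.filterMap (pvSym H1 H2 L1 L2))) := by
  unfold decode2B1Q_alt
  have hfun : (fun (s : List Char × Nat × Nat) (x : Int) =>
      match (if x = H2 then some 2
             else if x = H1 then some 3
             else if x = L1 then some 1
             else if x = L2 then some 0
             else none : Option Nat) with
      | some v =>
        let acc := s.2.1 * 4 + v
        if s.2.2 + 1 = 4 then (s.1 ++ [Char.ofNat acc], 0, 0)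
        else (s.1, acc, s.2.2 + 1)
      | none => s)
      = (fun (s : List Char × Nat × Nat) (x : Int) =>
          match pvSymN H1 H2 L1 L2 x with
          | some v => pvStepB s v
          | none => s) := by
    funext s x
    unfold pvSymN pvStepB
    rfl
  have hfm : l.foldl
      (fun (s : List Char × Nat × Nat) x =>
        match (if x = H2 then some 2
               else if x = H1 then some 3
               else if x = L1 then some 1
               else if x = L2 then some 0
               else none : Option Nat) with
        | some v =>
          let acc := s.2.1 * 4 + v
          if s.2.2 + 1 = 4 then (s.1 ++ [Char.ofNat acc], 0, 0)
          else (s.1, acc, s.2.2 + 1)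
        | none => s)
      ([], 0, 0)
      = (l.filterMap (pvSymN H1 H2 L1 L2)).foldl pvStepB ([], 0, 0) := by
    rw [hfun, List.foldl_filterMap]
    congr 1
    funext s x
    cases pvSymN H1 H2 L1 L2 x <;> rfl
  rw [hfm, pv_valsN, List.foldl_map]
  exact congrArg String.mk (pv_lb2 (l.filterMap (pvSym H1 H2 L1 L2)) [])

-- ===== VERDICT (by name: the statement is the Claim_ definition above) =====
theorem decode2B1Q_spec : Claim_equal_decode2B1Q := by
  intro l H1 H2 L1 L2 _
  unfold Spec_decode2B1Q decode2B1Q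
  rw [pv_la1 H1 H2 L1 L2 l []]
  rw [List.nil_append, pv_laTop, pv_lbTop]
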